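-- pv_equiv track=rewrite | github.com/Korialstrasz2/OmniTool | scripts/comfy_prompt_builder/server.py | _format_messages_for_kobold
-- ===== SOURCE A (Python) =====
-- from typing import Dict, List, Optional
--
-- def _format_messages_for_kobold(messages: List[Dict[str, str]]) -> str:
--     system_parts: List[str] = []
--     user_parts: List[str] = []
--     assistant_parts: List[str] = []
--     for message in messages:
--         role = message.get("role", "").lower()
--         content = message.get("content", "").strip()
--         if not content:
--             continue
--         if role == "system":
--             system_parts.append(content)
--         elif role == "assistant":
--             assistant_parts.append(content)
--         else:
--             user_parts.append(content)
--     sections = []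
--     if system_parts:
--         sections.append("System:\n" + "\n\n".join(system_parts))
--     if user_parts:
--         sections.append("User:\n" + "\n\n".join(user_parts))
--     if assistant_parts:
--         sections.append("Assistant:\n" + "\n\n".join(assistant_parts))
--     sections.append("Assistant:\n")
--     return "\n\n".join(sections)
-- ===== SOURCE B (Python) =====
-- def _format_messages_for_kobold(messages):
--     def cleaned(m):
--         return m.get("content", "").strip()
--
--     def norm(m):
--         r = m.get("role", "").lower()
--         return r if r in ("system", "assistant") else "user"
--
--     sections = []
--     for key, label in (("system", "System"), ("user", "User"), ("assistant", "Assistant")):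
--         parts = [cleaned(m) for m in messages if norm(m) == key and cleaned(m)]
--         if parts:
--             sections.append(label + ":\n" + "\n\n".join(parts))
--     return "\n\n".join(sections + ["Assistant:\n"])
-- ===== Notes on version B (the rewrite author's own statement) =====
-- stated objective: alternative
-- what changed: Replaces A's single pass that maintains three parallel accumulator lists plus three hand-written section ifs with staged per-section passes: for each entry of an ordered (key,label) table B re-scans the messages with a filtering comprehension keyed by a normalized role, so no accumulators are maintained at all.
import Mathlib
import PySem

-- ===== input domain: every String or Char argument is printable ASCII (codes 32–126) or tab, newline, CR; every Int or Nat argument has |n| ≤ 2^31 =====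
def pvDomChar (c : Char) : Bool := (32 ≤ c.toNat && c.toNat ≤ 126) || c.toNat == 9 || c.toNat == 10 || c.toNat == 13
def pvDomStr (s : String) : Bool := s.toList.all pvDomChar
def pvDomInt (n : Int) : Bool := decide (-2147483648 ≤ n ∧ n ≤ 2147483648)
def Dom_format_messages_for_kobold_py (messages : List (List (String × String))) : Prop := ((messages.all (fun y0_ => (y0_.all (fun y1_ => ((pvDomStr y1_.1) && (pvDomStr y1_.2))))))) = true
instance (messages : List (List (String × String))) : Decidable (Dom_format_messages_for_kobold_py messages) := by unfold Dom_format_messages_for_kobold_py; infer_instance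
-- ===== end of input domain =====

-- B replaces A's single pass maintaining three parallel accumulators (and three
-- hand-written section ifs) with staged per-section filtering passes driven by an
-- ordered (key,label) table; objective: alternative decomposition (same cost).

-- ===== PORT A =====
-- A's loop body: three parallel accumulators (system, user, assistant)
def aStepK (st : List String × List String × List String) (message : List (String × String)) :
    List String × List String × List String :=
  let role := PySem.Str.lower (PySem.Dict.getD (PySem.Dict.mk message) "role" "")
  let content := PySem.Str.strip (PySem.Dict.getD (PySem.Dict.mk message) "content" "")
  if content = "" then st
  else if role = "system" then (st.1 ++ [content], st.2.1, st.2.2)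
  else if role = "assistant" then (st.1, st.2.1, st.2.2 ++ [content])
  else (st.1, st.2.1 ++ [content], st.2.2)

def format_messages_for_kobold_py (messages : List (List (String × String))) : String :=
  let st := messages.foldl aStepK ([], [], [])
  let sections :=
    (if st.1 ≠ [] then ["System:\n" ++ PySem.Str.join "\n\n" st.1] else []) ++
    (if st.2.1 ≠ [] then ["User:\n" ++ PySem.Str.join "\n\n" st.2.1] else []) ++
    (if st.2.2 ≠ [] then ["Assistant:\n" ++ PySem.Str.join "\n\n" st.2.2] else []) ++
    ["Assistant:\n"]
  PySem.Str.join "\n\n" sections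

-- ===== PORT B =====
-- Source B's cleaned(m)
def bCleaned (m : List (String × String)) : String :=
  PySem.Str.strip (PySem.Dict.getD (PySem.Dict.mk m) "content" "")

-- Source B's norm(m)
def bNorm (m : List (String × String)) : String :=
  let r := PySem.Str.lower (PySem.Dict.getD (PySem.Dict.mk m) "role" "")
  if r = "system" ∨ r = "assistant" then r else "user"

-- the filtering comprehension for one section
def bParts (messages : List (List (String × String))) (key : String) : List String :=
  messages.filterMap (fun m => if bNorm m = key ∧ bCleaned m ≠ "" then some (bCleaned m) else none)

def format_messages_for_kobold_py_alt (messages : List (List (String × String))) : String :=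
  let sections :=
    [("system", "System"), ("user", "User"), ("assistant", "Assistant")].foldl
      (fun acc p =>
        let parts := bParts messages p.1
        if parts ≠ [] then acc ++ [p.2 ++ ":\n" ++ PySem.Str.join "\n\n" parts] else acc)
      []
  PySem.Str.join "\n\n" (sections ++ ["Assistant:\n"])

-- ===== PRECONDITION & SPEC =====
def Spec_format_messages_for_kobold_py (messages : List (List (String × String))) (out : String) : Prop := out = format_messages_for_kobold_py_alt messages
instance (messages : List (List (String × String))) (out : String) : Decidable (Spec_format_messages_for_kobold_py messages out) := by unfold Spec_format_messages_for_kobold_py; infer_instance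

-- ===== CLAIM (what is proved, stated in full; the proofs are below) =====
def Claim_equal_format_messages_for_kobold_py : Prop := ∀ (messages : List (List (String × String))), Dom_format_messages_for_kobold_py messages → Spec_format_messages_for_kobold_py messages (format_messages_for_kobold_py messages)

-- ===== LEMMAS AND PROOFS =====

-- A's fold over the messages computes exactly B's three filtered section lists.
lemma foldK_eq (msgs : List (List (String × String))) : ∀ (s u a : List String),
    msgs.foldl aStepK (s, u, a) =
      (s ++ bParts msgs "system", u ++ bParts msgs "user", a ++ bParts msgs "assistant") := by
  induction msgs with
  | nil => intro s u a; simp [bParts]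
  | cons m rest ih =>
    intro s u a
    simp only [List.foldl_cons, bParts, List.filterMap_cons]
    have hstep : aStepK (s, u, a) m =
        (s ++ (if bNorm m = "system" ∧ bCleaned m ≠ "" then [bCleaned m] else []),
         u ++ (if bNorm m = "user" ∧ bCleaned m ≠ "" then [bCleaned m] else []),
         a ++ (if bNorm m = "assistant" ∧ bCleaned m ≠ "" then [bCleaned m] else [])) := by
      unfold aStepK bNorm bCleaned
      set role := PySem.Str.lower (PySem.Dict.getD (PySem.Dict.mk m) "role" "") with hr
      set content := PySem.Str.strip (PySem.Dict.getD (PySem.Dict.mk m) "content" "") with hc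
      by_cases h0 : content = ""
      · simp [h0]
      · by_cases hs : role = "system"
        · simp [h0, hs]
        · by_cases ha : role = "assistant"
          · simp [h0, hs, ha]
          · simp [h0, hs, ha]
    rw [hstep, ih]
    by_cases h0 : bCleaned m = ""
    · simp [h0, bParts]
    · by_cases hs : bNorm m = "system"
      · have hu : bNorm m ≠ "user" := by rw [hs]; decide
        have ha : bNorm m ≠ "assistant" := by rw [hs]; decide
        simp [h0, hs, hu, ha, bParts]
      · by_cases ha : bNorm m = "assistant"
        · have hu : bNorm m ≠ "user" := by rw [ha]; decide
          simp [h0, hs, hu, ha, bParts]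
        · have hu : bNorm m = "user" := by
            unfold bNorm at hs ha ⊢
            set r := PySem.Str.lower (PySem.Dict.getD (PySem.Dict.mk m) "role" "") with hr
            by_cases h : r = "system" ∨ r = "assistant"
            · simp only [h, if_pos] at hs ha ⊢
              rcases h with h | h <;> simp_all
            · simp [h]
          simp [h0, hs, ha, hu, bParts]

-- ===== VERDICT (by name: the statement is the Claim_ definition above) =====
theorem format_messages_for_kobold_py_spec : Claim_equal_format_messages_for_kobold_py := by
  intro messages _
  unfold Spec_format_messages_for_kobold_py
  unfold format_messages_for_kobold_py format_messages_for_kobold_py_alt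
  rw [foldK_eq]
  simp only [List.nil_append, List.foldl_cons, List.foldl_nil]
  split_ifs <;> simp_all
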